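-- pv_equiv track=rewrite | github.com/nestharus/worldbuilding-tools | diffchecker.py | find_largest_match
-- ===== SOURCE A (Python) =====
-- def find_match(tokens1, tokens2, start1, start2, min_length=3):
--     """Find length of matching sequence starting at given positions"""
--     length = 0
--     while (start1 + length < len(tokens1) and
--            start2 + length < len(tokens2) and
--            tokens1[start1 + length] == tokens2[start2 + length]):
--         length += 1
--     return length if length >= min_length else 0
--
-- def find_largest_match(tokens1, tokens2, used1, used2, min_length=3):
--     """Find the largest matching sequence that hasn't been used"""
--     best_match = None
--     best_length = min_length - 1
--
--     for i in range(len(tokens1)):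
--         if i in used1:
--             continue
--
--         for j in range(len(tokens2)):
--             if j in used2:
--                 continue
--
--             if tokens1[i] == tokens2[j]:
--                 length = find_match(tokens1, tokens2, i, j, min_length)
--                 if length > best_length:
--                     best_length = length
--                     best_match = (i, j, length)
--
--     return best_match
-- ===== SOURCE B (Python) =====
-- def find_largest_match(tokens1, tokens2, used1, used2, min_length=3):
--     """Find the largest matching sequence that hasn't been used"""
--     n, m = len(tokens1), len(tokens2)
--     u1, u2 = set(used1), set(used2)
--     # dp[i][j] = length of the common run starting at tokens1[i], tokens2[j]
--     dp = [[0] * (m + 1) for _ in range(n + 1)]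
--     for i in range(n - 1, -1, -1):
--         row, nxt, t = dp[i], dp[i + 1], tokens1[i]
--         for j in range(m - 1, -1, -1):
--             if t == tokens2[j]:
--                 row[j] = nxt[j + 1] + 1
--     best = None
--     best_len = max(min_length - 1, 0)
--     for i in range(n):
--         if i in u1:
--             continue
--         for j in range(m):
--             if j in u2:
--                 continue
--             v = dp[i][j]
--             if v > best_len:
--                 best_len = v
--                 best = (i, j, v)
--     return best
-- ===== Notes on version B (the rewrite author's own statement) =====
-- stated objective: faster
-- what changed: Replaces the per-pair while-loop rescans with a suffix-match-length DP table dp[i][j]=dp[i+1][j+1]+1 built once in O(n*m), then a single scan over unused (i,j) pairs with the same strict-improvement tie-break.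
import Mathlib
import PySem

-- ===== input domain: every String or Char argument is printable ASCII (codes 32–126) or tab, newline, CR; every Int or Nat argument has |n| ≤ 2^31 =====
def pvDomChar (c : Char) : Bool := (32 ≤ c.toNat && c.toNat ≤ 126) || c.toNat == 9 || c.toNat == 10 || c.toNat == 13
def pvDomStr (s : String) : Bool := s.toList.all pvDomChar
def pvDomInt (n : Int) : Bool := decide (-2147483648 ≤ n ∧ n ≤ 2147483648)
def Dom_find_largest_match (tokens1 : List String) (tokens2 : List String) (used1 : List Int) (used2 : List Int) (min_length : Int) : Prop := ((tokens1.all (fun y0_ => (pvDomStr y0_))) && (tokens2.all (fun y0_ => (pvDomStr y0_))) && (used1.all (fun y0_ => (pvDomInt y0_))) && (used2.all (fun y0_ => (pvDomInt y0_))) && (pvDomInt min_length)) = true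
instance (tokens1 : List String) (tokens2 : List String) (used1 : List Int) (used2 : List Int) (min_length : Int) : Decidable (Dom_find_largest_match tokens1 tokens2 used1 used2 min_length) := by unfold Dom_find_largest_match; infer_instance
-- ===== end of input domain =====

-- B replaces A's per-pair while-loop rescans with a suffix-run DP table built once, then one scan with the same tie-break (faster).


-- ===== PORT A =====
-- the while loop of find_match, with a fuel bound that only ensures totality
-- (the loop body requires s1+len < len(tokens1), so fuel = len(tokens1)+1 is never exhausted)
def pvFindMatchLoop (t1 t2 : List String) (s1 s2 : Nat) (len : Nat) : Nat → Nat
  | 0 => len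
  | fuel+1 =>
    if s1 + len < t1.length ∧ s2 + len < t2.length ∧
        t1.getD (s1 + len) "" = t2.getD (s2 + len) "" then
      pvFindMatchLoop t1 t2 s1 s2 (len + 1) fuel
    else len

def find_match (tokens1 tokens2 : List String) (start1 start2 : Nat) (min_length : Int) : Int :=
  let length : Int := (pvFindMatchLoop tokens1 tokens2 start1 start2 0 (tokens1.length + 1) : Nat)
  if length ≥ min_length then length else 0

def find_largest_match (tokens1 : List String) (tokens2 : List String) (used1 : List Int) (used2 : List Int) (min_length : Int) : Option (Int × Int × Int) :=
  let res := (List.range tokens1.length).foldl (fun st (i : Nat) =>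
    if (i : Int) ∈ used1 then st else
    (List.range tokens2.length).foldl (fun st (j : Nat) =>
      if (j : Int) ∈ used2 then st else
      if tokens1.getD i "" = tokens2.getD j "" then
        let length := find_match tokens1 tokens2 i j min_length
        if length > st.2 then (some ((i : Int), (j : Int), length), length) else st
      else st) st) ((none : Option (Int × Int × Int)), min_length - 1)
  res.1

-- ===== PORT B =====
-- one DP row: (pvBuildRow s t2 nxt)[j] = nxt[j+1]+1 if s = t2[j] else 0, plus the trailing 0 at j = len(t2)
def pvBuildRow (s : String) : List String → List Nat → List Nat
  | [], _ => [0]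
  | c :: rest, nxt => (if s = c then nxt.tail.headD 0 + 1 else 0) :: pvBuildRow s rest nxt.tail

-- the DP table, rows built bottom-up (row i from row i+1), row n all zeros
def pvDpRows (t2 : List String) : List String → List (List Nat)
  | [] => [List.replicate (t2.length + 1) 0]
  | s :: rest =>
    let rows := pvDpRows t2 rest
    pvBuildRow s t2 (rows.headD []) :: rows

def find_largest_match_alt (tokens1 : List String) (tokens2 : List String) (used1 : List Int) (used2 : List Int) (min_length : Int) : Option (Int × Int × Int) :=
  let u1 := PySem.Set.ofList used1
  let u2 := PySem.Set.ofList used2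
  let dp := pvDpRows tokens2 tokens1
  let res := (List.range tokens1.length).foldl (fun st (i : Nat) =>
    if (i : Int) ∈ u1 then st else
    (List.range tokens2.length).foldl (fun st (j : Nat) =>
      if (j : Int) ∈ u2 then st else
      let v : Int := ((dp.getD i []).getD j 0 : Nat)
      if v > st.2 then (some ((i : Int), (j : Int), v), v) else st) st)
    ((none : Option (Int × Int × Int)), max (min_length - 1) 0)
  res.1

-- ===== PRECONDITION & SPEC =====
def Spec_find_largest_match (tokens1 : List String) (tokens2 : List String) (used1 : List Int) (used2 : List Int) (min_length : Int) (out : Option (Int × Int × Int)) : Prop := out = find_largest_match_alt tokens1 tokens2 used1 used2 min_length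
instance (tokens1 : List String) (tokens2 : List String) (used1 : List Int) (used2 : List Int) (min_length : Int) (out : Option (Int × Int × Int)) : Decidable (Spec_find_largest_match tokens1 tokens2 used1 used2 min_length out) := by unfold Spec_find_largest_match; infer_instance

-- ===== CLAIM (what is proved, stated in full; the proofs are below) =====
def Claim_equal_find_largest_match : Prop := ∀ (tokens1 : List String) (tokens2 : List String) (used1 : List Int) (used2 : List Int) (min_length : Int), Dom_find_largest_match tokens1 tokens2 used1 used2 min_length → Spec_find_largest_match tokens1 tokens2 used1 used2 min_length (find_largest_match tokens1 tokens2 used1 used2 min_length)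

-- ===== LEMMAS AND PROOFS =====

-- the common run length starting at the heads of two suffixes
def pvRun : List String → List String → Nat
  | a :: l1, b :: l2 => if a = b then pvRun l1 l2 + 1 else 0
  | _, _ => 0

theorem pvRun_nil_left (l : List String) : pvRun [] l = 0 := by cases l <;> rfl
theorem pvRun_nil_right (l : List String) : pvRun l [] = 0 := by cases l <;> rfl

theorem pv_getD_tail {α : Type} (l : List α) (k : Nat) (d : α) :
    l.tail.getD k d = l.getD (k + 1) d := by cases l <;> simp

theorem pv_headD_eq_getD {α : Type} (l : List α) (d : α) : l.headD d = l.getD 0 d := by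
  cases l <;> simp

theorem pvBuildRow_getD (s : String) (t2 : List String) :
    ∀ (nxt : List Nat) (j : Nat),
      (pvBuildRow s t2 nxt).getD j 0 =
        if j < t2.length ∧ s = t2.getD j "" then nxt.getD (j + 1) 0 + 1 else 0 := by
  induction t2 with
  | nil =>
    intro nxt j
    simp only [pvBuildRow, List.length_nil]
    rw [if_neg (by rintro ⟨h1, _⟩; omega)]
    cases j <;> simp
  | cons c rest ih =>
    intro nxt j
    cases j with
    | zero =>
      simp [pvBuildRow]
    | succ j =>
      simp only [pvBuildRow, List.getD_cons_succ, ih, pv_getD_tail, List.length_cons]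
      by_cases h : j < rest.length ∧ s = rest.getD j ""
      · rw [if_pos h, if_pos ⟨by omega, h.2⟩]
      · rw [if_neg h, if_neg (by rintro ⟨h1, h2⟩; exact h ⟨by omega, h2⟩)]

theorem pvDpRows_getD (t2 : List String) :
    ∀ (t1 : List String) (i j : Nat),
      ((pvDpRows t2 t1).getD i []).getD j 0 = pvRun (t1.drop i) (t2.drop j) := by
  intro t1
  induction t1 with
  | nil =>
    intro i j
    cases i with
    | zero =>
      simp [pvDpRows, pvRun_nil_left, List.getD]
    | succ i =>
      simp [pvDpRows, pvRun_nil_left, List.getD]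
  | cons s rest ih =>
    intro i j
    cases i with
    | zero =>
      simp only [pvDpRows, List.getD_cons_zero, List.drop_zero]
      rw [pvBuildRow_getD, pv_headD_eq_getD]
      have hhead := ih 0 (j + 1)
      rw [List.drop_zero] at hhead
      by_cases hj : j < t2.length
      · have hcons : t2.drop j = t2[j] :: t2.drop (j + 1) := List.drop_eq_getElem_cons hj
        rw [hcons]
        by_cases he : s = t2[j]
        · rw [if_pos ⟨hj, by rw [List.getD_eq_getElem _ _ hj]; exact he⟩, hhead]
          simp [pvRun, he]
        · rw [if_neg (by rintro ⟨_, h2⟩; rw [List.getD_eq_getElem _ _ hj] at h2; exact he h2)]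
          simp [pvRun, he]
      · rw [List.drop_eq_nil_of_le (by omega), pvRun_nil_right,
          if_neg (by rintro ⟨h1, _⟩; omega)]
    | succ i =>
      simp only [pvDpRows, List.getD_cons_succ, List.drop_succ_cons]
      exact ih i j

theorem pvFindMatchLoop_eq (t1 t2 : List String) (s1 s2 : Nat) :
    ∀ (fuel len : Nat), t1.length - (s1 + len) < fuel →
      pvFindMatchLoop t1 t2 s1 s2 len fuel =
        len + pvRun (t1.drop (s1 + len)) (t2.drop (s2 + len)) := by
  intro fuel
  induction fuel with
  | zero => intro len h; omega
  | succ fuel ih =>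
    intro len h
    by_cases hc : s1 + len < t1.length ∧ s2 + len < t2.length ∧
        t1.getD (s1 + len) "" = t2.getD (s2 + len) ""
    · obtain ⟨h1, h2, h3⟩ := hc
      rw [pvFindMatchLoop, if_pos ⟨h1, h2, h3⟩, ih (len + 1) (by omega)]
      rw [List.drop_eq_getElem_cons h1, List.drop_eq_getElem_cons h2]
      rw [List.getD_eq_getElem _ _ h1, List.getD_eq_getElem _ _ h2] at h3
      have : pvRun (t1[s1 + len] :: t1.drop (s1 + len + 1)) (t2[s2 + len] :: t2.drop (s2 + len + 1))
          = pvRun (t1.drop (s1 + len + 1)) (t2.drop (s2 + len + 1)) + 1 := by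
        simp [pvRun, h3]
      rw [this]
      have e1 : s1 + (len + 1) = s1 + len + 1 := by omega
      have e2 : s2 + (len + 1) = s2 + len + 1 := by omega
      rw [e1, e2]
      omega
    · rw [pvFindMatchLoop, if_neg hc]
      by_cases h1 : s1 + len < t1.length
      · by_cases h2 : s2 + len < t2.length
        · have h3 : ¬ t1.getD (s1 + len) "" = t2.getD (s2 + len) "" := by
            intro h3; exact hc ⟨h1, h2, h3⟩
          rw [List.drop_eq_getElem_cons h1, List.drop_eq_getElem_cons h2]
          rw [List.getD_eq_getElem _ _ h1, List.getD_eq_getElem _ _ h2] at h3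
          simp [pvRun, h3]
        · rw [List.drop_eq_nil_of_le (show t2.length ≤ s2 + len by omega), pvRun_nil_right]
          omega
      · rw [List.drop_eq_nil_of_le (show t1.length ≤ s1 + len by omega), pvRun_nil_left]
        omega

theorem pv_find_match_eq (t1 t2 : List String) (i j : Nat) (ml : Int) :
    find_match t1 t2 i j ml =
      (if ((pvRun (t1.drop i) (t2.drop j) : Nat) : Int) ≥ ml
       then ((pvRun (t1.drop i) (t2.drop j) : Nat) : Int) else 0) := by
  have := pvFindMatchLoop_eq t1 t2 i j (t1.length + 1) 0 (by omega)
  simp only [find_match, this, Nat.zero_add, Nat.add_zero]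

-- the invariant between A's fold state and B's fold state
def pvInv (ml : Int) (a b : Option (Int × Int × Int) × Int) : Prop :=
  a.1 = b.1 ∧ b.2 = max a.2 0 ∧ ml - 1 ≤ a.2

theorem pv_run_pos (t1 t2 : List String) (i j : Nat) (hi : i < t1.length) (hj : j < t2.length)
    (he : t1.getD i "" = t2.getD j "") : 1 ≤ pvRun (t1.drop i) (t2.drop j) := by
  rw [List.drop_eq_getElem_cons hi, List.drop_eq_getElem_cons hj]
  rw [List.getD_eq_getElem _ _ hi, List.getD_eq_getElem _ _ hj] at he
  simp [pvRun, he]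

theorem pv_run_zero (t1 t2 : List String) (i j : Nat) (hi : i < t1.length) (hj : j < t2.length)
    (he : ¬ t1.getD i "" = t2.getD j "") : pvRun (t1.drop i) (t2.drop j) = 0 := by
  rw [List.drop_eq_getElem_cons hi, List.drop_eq_getElem_cons hj]
  rw [List.getD_eq_getElem _ _ hi, List.getD_eq_getElem _ _ hj] at he
  simp [pvRun, he]

theorem pv_inner_step (t1 t2 : List String) (u2 : List Int) (ml : Int) (i j : Nat)
    (hi : i < t1.length) (hj : j < t2.length)
    (a b : Option (Int × Int × Int) × Int) (h : pvInv ml a b) :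
    pvInv ml
      (if (j : Int) ∈ u2 then a else
        if t1.getD i "" = t2.getD j "" then
          let length := find_match t1 t2 i j ml
          if length > a.2 then (some ((i : Int), (j : Int), length), length) else a
        else a)
      (if (j : Int) ∈ PySem.Set.ofList u2 then b else
        let v : Int := (((pvDpRows t2 t1).getD i []).getD j 0 : Nat)
        if v > b.2 then (some ((i : Int), (j : Int), v), v) else b) := by
  obtain ⟨hfst, hsnd, hml⟩ := h
  by_cases hu : (j : Int) ∈ u2
  · rw [if_pos hu, if_pos ((PySem.Set.mem_ofList _ _).mpr hu)]
    exact ⟨hfst, hsnd, hml⟩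
  · rw [if_neg hu, if_neg (fun hm => hu ((PySem.Set.mem_ofList _ _).mp hm))]
    simp only [pvDpRows_getD]
    set L : Nat := pvRun (t1.drop i) (t2.drop j) with hL
    by_cases he : t1.getD i "" = t2.getD j ""
    · rw [if_pos he]
      have hL1 : 1 ≤ L := pv_run_pos t1 t2 i j hi hj he
      simp only [pv_find_match_eq t1 t2 i j ml, ← hL]
      by_cases hge : ((L : Nat) : Int) ≥ ml
      · rw [if_pos hge]
        by_cases hbig : ((L : Nat) : Int) > a.2
        · rw [if_pos hbig, if_pos (by omega)]
          exact ⟨rfl, by simp, by omega⟩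
        · rw [if_neg hbig, if_neg (by omega)]
          exact ⟨hfst, hsnd, hml⟩
      · rw [if_neg hge]
        have hno : ¬ ((0 : Int) > a.2) := by omega
        rw [if_neg hno, if_neg (by omega)]
        exact ⟨hfst, hsnd, hml⟩
    · rw [if_neg he]
      have h0 : L = 0 := pv_run_zero t1 t2 i j hi hj he
      rw [if_neg (by rw [h0]; omega)]
      exact ⟨hfst, hsnd, hml⟩

theorem pv_inner_fold (t1 t2 : List String) (u2 : List Int) (ml : Int) (i : Nat)
    (hi : i < t1.length) :
    ∀ (l : List Nat), (∀ j ∈ l, j < t2.length) →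
      ∀ (a b : Option (Int × Int × Int) × Int), pvInv ml a b →
      pvInv ml
        (l.foldl (fun st (j : Nat) =>
          if (j : Int) ∈ u2 then st else
          if t1.getD i "" = t2.getD j "" then
            let length := find_match t1 t2 i j ml
            if length > st.2 then (some ((i : Int), (j : Int), length), length) else st
          else st) a)
        (l.foldl (fun st (j : Nat) =>
          if (j : Int) ∈ PySem.Set.ofList u2 then st else
          let v : Int := (((pvDpRows t2 t1).getD i []).getD j 0 : Nat)
          if v > st.2 then (some ((i : Int), (j : Int), v), v) else st) b) := by
  intro l
  induction l with
  | nil => intro _ a b h; exact h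
  | cons j rest ih =>
    intro hbound a b h
    simp only [List.foldl_cons]
    exact ih (fun x hx => hbound x (List.mem_cons_of_mem _ hx))
      _ _ (pv_inner_step t1 t2 u2 ml i j hi (hbound j (List.mem_cons_self)) a b h)

theorem pv_outer_fold (t1 t2 : List String) (u1 u2 : List Int) (ml : Int) :
    ∀ (l : List Nat), (∀ i ∈ l, i < t1.length) →
      ∀ (a b : Option (Int × Int × Int) × Int), pvInv ml a b →
      pvInv ml
        (l.foldl (fun st (i : Nat) =>
          if (i : Int) ∈ u1 then st else
          (List.range t2.length).foldl (fun st (j : Nat) =>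
            if (j : Int) ∈ u2 then st else
            if t1.getD i "" = t2.getD j "" then
              let length := find_match t1 t2 i j ml
              if length > st.2 then (some ((i : Int), (j : Int), length), length) else st
            else st) st) a)
        (l.foldl (fun st (i : Nat) =>
          if (i : Int) ∈ PySem.Set.ofList u1 then st else
          (List.range t2.length).foldl (fun st (j : Nat) =>
            if (j : Int) ∈ PySem.Set.ofList u2 then st else
            let v : Int := (((pvDpRows t2 t1).getD i []).getD j 0 : Nat)
            if v > st.2 then (some ((i : Int), (j : Int), v), v) else st) st) b) := by
  intro l
  induction l with
  | nil => intro _ a b h; exact h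
  | cons i rest ih =>
    intro hbound a b h
    simp only [List.foldl_cons]
    apply ih (fun x hx => hbound x (List.mem_cons_of_mem _ hx))
    by_cases hu : (i : Int) ∈ u1
    · rw [if_pos hu, if_pos ((PySem.Set.mem_ofList _ _).mpr hu)]
      exact h
    · rw [if_neg hu, if_neg (fun hm => hu ((PySem.Set.mem_ofList _ _).mp hm))]
      exact pv_inner_fold t1 t2 u2 ml i (hbound i List.mem_cons_self)
        (List.range t2.length) (fun j hj => List.mem_range.mp hj) a b h

-- ===== VERDICT (by name: the statement is the Claim_ definition above) =====
theorem find_largest_match_spec : Claim_equal_find_largest_match := by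
  intro t1 t2 u1 u2 ml _
  unfold Spec_find_largest_match find_largest_match find_largest_match_alt
  have h := pv_outer_fold t1 t2 u1 u2 ml (List.range t1.length)
    (fun i hi => List.mem_range.mp hi)
    ((none : Option (Int × Int × Int)), ml - 1)
    ((none : Option (Int × Int × Int)), max (ml - 1) 0)
    ⟨rfl, rfl, by omega⟩
  exact h.1
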